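-- pv_equiv track=rewrite | github.com/ivknv/old-stuff | web-noter/Diff/__init__.py | findAllDifferences
-- ===== SOURCE A (Python) =====
-- def findAllDifferences(s1, s2):
-- 	differences=[]
-- 	i=0
-- 	while i<max(len(s1), len(s2)):
-- 		try:
-- 			if s1[i]!=s2[i]:
-- 				differences.append(i)
-- 		except IndexError:
-- 			differences.append(i)
-- 		i+=1
-- 	return differences
-- ===== SOURCE B (Python) =====
-- def findAllDifferences(s1, s2):
--     matches = {i for i, pair in enumerate(zip(s1, s2)) if pair[0] == pair[1]}
--     return [i for i in range(max(len(s1), len(s2))) if i not in matches]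
-- ===== Notes on version B (the rewrite author's own statement) =====
-- stated objective: alternative
-- what changed: Instead of walking indices and appending mismatches under try/except IndexError, B builds the set of positions where the two strings AGREE and returns the complement of that set over range(max(len(s1),len(s2))) - an inverted predicate with set membership replacing exception-driven bounds handling.
import Mathlib
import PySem

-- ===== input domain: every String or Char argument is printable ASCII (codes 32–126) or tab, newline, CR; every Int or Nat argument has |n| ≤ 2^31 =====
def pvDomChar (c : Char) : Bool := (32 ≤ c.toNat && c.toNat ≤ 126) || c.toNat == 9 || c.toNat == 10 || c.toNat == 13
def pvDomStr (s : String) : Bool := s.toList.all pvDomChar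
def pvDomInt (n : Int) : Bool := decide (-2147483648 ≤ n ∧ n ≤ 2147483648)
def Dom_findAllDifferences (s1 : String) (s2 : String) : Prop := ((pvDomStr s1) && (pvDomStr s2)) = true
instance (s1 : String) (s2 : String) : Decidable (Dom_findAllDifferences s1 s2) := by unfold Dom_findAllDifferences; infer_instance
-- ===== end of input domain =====

-- ===== PORT A =====
-- B inverts A's predicate: it builds the set of positions where the strings AGREE and
-- returns the complement over range(max(len1,len2)), replacing A's try/except index walk.
def findAllDifferences (s1 : String) (s2 : String) : List Int :=
  let l1 := s1.toList
  let l2 := s2.toList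
  (PySem.List.pyRange 0 (max (l1.length : Int) (l2.length : Int)) 1).foldl
    (fun differences i =>
      match PySem.List.pyGet? l1 i, PySem.List.pyGet? l2 i with
      | some c1, some c2 => if c1 ≠ c2 then differences ++ [i] else differences
      | _, _ => differences ++ [i]) []

-- ===== PORT B =====
def findAllDifferences_alt (s1 : String) (s2 : String) : List Int :=
  let l1 := s1.toList
  let l2 := s2.toList
  let agreeSet : PySem.Set Int := PySem.Set.ofList
    (((PySem.List.enumerate (l1.zip l2) 0).filter (fun p => p.2.1 == p.2.2)).map (fun p => p.1))
  (PySem.List.pyRange 0 (max (l1.length : Int) (l2.length : Int)) 1).filter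
    (fun i => !(PySem.Set.contains agreeSet i))

-- ===== PRECONDITION & SPEC =====
def Spec_findAllDifferences (s1 : String) (s2 : String) (out : List Int) : Prop := out = findAllDifferences_alt s1 s2
instance (s1 : String) (s2 : String) (out : List Int) : Decidable (Spec_findAllDifferences s1 s2 out) := by unfold Spec_findAllDifferences; infer_instance

-- ===== CLAIM (what is proved, stated in full; the proofs are below) =====
def Claim_equal_findAllDifferences : Prop := ∀ (s1 : String) (s2 : String), Dom_findAllDifferences s1 s2 → Spec_findAllDifferences s1 s2 (findAllDifferences s1 s2)

-- ===== LEMMAS AND PROOFS =====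

-- membership in B's "agreeing positions" set, characterised on the input lists
theorem pvAgree_mem (l1 l2 : List Char) (i : Int) :
    (i ∈ ((PySem.List.enumerate (l1.zip l2) 0).filter (fun p => p.2.1 == p.2.2)).map (fun p => p.1))
    ↔ ∃ k : Nat, ∃ h1 : k < l1.length, ∃ h2 : k < l2.length, i = (k : Int) ∧ l1[k]'h1 = l2[k]'h2 := by
  constructor
  · rintro h
    rcases List.mem_map.mp h with ⟨p, hp, rfl⟩
    rcases List.mem_filter.mp hp with ⟨hpe, hpeq⟩
    rcases (PySem.List.mem_enumerate_iff (l1.zip l2) 0 p).mp hpe with ⟨k, hk, rfl⟩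
    have hk1 : k < l1.length := by simp [List.length_zip] at hk; omega
    have hk2 : k < l2.length := by simp [List.length_zip] at hk; omega
    refine ⟨k, hk1, hk2, by simp, ?_⟩
    have := hpeq
    simp [List.getElem_zip] at this
    exact this
  · rintro ⟨k, hk1, hk2, rfl, heq⟩
    have hk : k < (l1.zip l2).length := by simp [List.length_zip]; omega
    refine List.mem_map.mpr ⟨((k : Int), (l1.zip l2)[k]), ?_, by simp⟩
    refine List.mem_filter.mpr ⟨(PySem.List.mem_enumerate_iff (l1.zip l2) 0 _).mpr ⟨k, hk, by simp⟩, ?_⟩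
    simp [List.getElem_zip, heq]

-- the whole equivalence on the underlying character lists
theorem pvAB (l1 l2 : List Char) :
    (PySem.List.pyRange 0 (max (l1.length : Int) (l2.length : Int)) 1).foldl
      (fun differences i =>
        match PySem.List.pyGet? l1 i, PySem.List.pyGet? l2 i with
        | some c1, some c2 => if c1 ≠ c2 then differences ++ [i] else differences
        | _, _ => differences ++ [i]) []
    = (PySem.List.pyRange 0 (max (l1.length : Int) (l2.length : Int)) 1).filter
        (fun i => !(PySem.Set.contains (PySem.Set.ofList
          (((PySem.List.enumerate (l1.zip l2) 0).filter (fun p => p.2.1 == p.2.2)).map (fun p => p.1))) i)) := by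
  set M : PySem.Set Int := PySem.Set.ofList
    (((PySem.List.enumerate (l1.zip l2) 0).filter (fun p => p.2.1 == p.2.2)).map (fun p => p.1)) with hM
  have hconM : ∀ i : Int, PySem.Set.contains M i = true ↔
      ∃ k : Nat, ∃ h1 : k < l1.length, ∃ h2 : k < l2.length, i = (k : Int) ∧ l1[k]'h1 = l2[k]'h2 := by
    intro i
    rw [hM, PySem.Set.contains_iff, PySem.Set.mem_ofList]
    exact pvAgree_mem l1 l2 i
  rw [PySem.List.foldl_congr_mem _ _ (fun differences i => if !(PySem.Set.contains M i) then differences ++ [i] else differences)]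
  · rw [PySem.List.foldl_append_if_eq_filter]
    simp
  · intro a i hi
    rw [PySem.List.mem_pyRange_one] at hi
    cases hg1 : PySem.List.pyGet? l1 i with
    | none =>
      have hcf : PySem.Set.contains M i = false := by
        rw [Bool.eq_false_iff]
        intro hc
        rcases (hconM i).mp hc with ⟨k, hk1, _, rfl, _⟩
        rw [PySem.List.pyGet?_of_nonneg l1 (by omega)] at hg1
        simp at hg1
        omega
      have hnm : i ∉ M := fun h => by
        rw [(PySem.Set.contains_iff M i).mpr h] at hcf; cases hcf
      simp [hnm]
    | some c1 =>
      cases hg2 : PySem.List.pyGet? l2 i with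
      | none =>
        have hcf : PySem.Set.contains M i = false := by
          rw [Bool.eq_false_iff]
          intro hc
          rcases (hconM i).mp hc with ⟨k, _, hk2, rfl, _⟩
          rw [PySem.List.pyGet?_of_nonneg l2 (by omega)] at hg2
          simp at hg2
          omega
        have hnm : i ∉ M := fun h => by
          rw [(PySem.Set.contains_iff M i).mpr h] at hcf; cases hcf
        simp [hnm]
      | some c2 =>
        rw [PySem.List.pyGet?_of_nonneg l1 (by omega)] at hg1
        rw [PySem.List.pyGet?_of_nonneg l2 (by omega)] at hg2
        have h1 := (List.getElem?_eq_some_iff.mp hg1).1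
        have h2 := (List.getElem?_eq_some_iff.mp hg2).1
        have he1 : l1[i.toNat]'h1 = c1 := (List.getElem?_eq_some_iff.mp hg1).2
        have he2 : l2[i.toNat]'h2 = c2 := (List.getElem?_eq_some_iff.mp hg2).2
        have hcm : i ∈ M ↔ c1 = c2 := by
          rw [← PySem.Set.contains_iff, hconM i]
          constructor
          · rintro ⟨k, hk1, hk2, hik, heq⟩
            have hkk : k = i.toNat := by omega
            subst hkk
            rw [he1, he2] at heq
            exact heq
          · intro hcc
            exact ⟨i.toNat, h1, h2, by omega, by rw [he1, he2]; exact hcc⟩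
        by_cases hcc : c1 = c2
        · have hmem : i ∈ M := hcm.mpr hcc
          simp [hmem, hcc]
        · have hnm : i ∉ M := fun h => hcc (hcm.mp h)
          simp [hnm, hcc]

-- ===== VERDICT (by name: the statement is the Claim_ definition above) =====
theorem findAllDifferences_spec : Claim_equal_findAllDifferences := by
  intro s1 s2 _
  unfold Spec_findAllDifferences findAllDifferences findAllDifferences_alt
  exact pvAB s1.toList s2.toList
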